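-- pv_equiv track=rewrite | github.com/L3sius/BioInformatics | 1Laboratorinis/Kodas/main.py | findCodonSeq
-- ===== SOURCE A (Python) =====
-- def findCodonSeq(seq):
--     i = 0
--     codon_list = []
--     while i < len(seq):
--         if seq[i] == 'ATG':
--             start_pos = i
--             j = i
--             while j < len(seq):
--                 if seq[j] == 'TAA' or seq[j] == 'TAG' or seq[j] == 'TGA':
--                     end_pos = j
--                     codon_list.append(''.join(str(e) for e in seq[start_pos:end_pos + 1]))
--                     i = j
--                     break
--                 j += 1
--         i += 1
--     return codon_list
-- ===== SOURCE B (Python) =====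
-- def findCodonSeq(seq):
--     # One linear pass: a start/stop state machine accumulating the current
--     # open reading frame in `buf` (None = not inside an ATG-started frame).
--     codon_list = []
--     buf = None
--     for codon in seq:
--         if buf is None:
--             if codon == 'ATG':
--                 buf = codon
--         else:
--             buf += codon
--             if codon in ('TAA', 'TAG', 'TGA'):
--                 codon_list.append(buf)
--                 buf = None
--     return codon_list
-- ===== Notes on version B (the rewrite author's own statement) =====
-- stated objective: faster
-- what changed: Replaced the nested rescan (outer index loop with an inner forward scan to the stop codon, plus a slice-and-join per hit) by a single linear pass state machine that accumulates the current ATG-opened frame in a growing buffer and emits it at the first stop codon.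
import Mathlib
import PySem

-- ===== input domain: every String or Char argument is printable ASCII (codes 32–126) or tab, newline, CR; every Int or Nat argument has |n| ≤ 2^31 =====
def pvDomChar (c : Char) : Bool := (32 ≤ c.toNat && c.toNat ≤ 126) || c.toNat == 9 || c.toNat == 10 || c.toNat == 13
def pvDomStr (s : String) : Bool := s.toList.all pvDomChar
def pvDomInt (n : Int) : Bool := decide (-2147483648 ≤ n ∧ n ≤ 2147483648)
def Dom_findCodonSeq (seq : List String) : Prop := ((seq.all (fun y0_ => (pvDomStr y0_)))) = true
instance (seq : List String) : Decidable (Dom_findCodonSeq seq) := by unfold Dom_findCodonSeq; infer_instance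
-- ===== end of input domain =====

-- B replaces A's quadratic rescan by one linear pass with a start/stop state machine; equivalence is proved on all inputs.

-- ===== PORT A =====
-- inner 'while j < len(seq): if seq[j] in stops: break; j += 1' — returns the index j at which it broke, none if it ran off the end
def pvFindStop (seq : List String) (j : Nat) : Option Nat :=
  if h : j < seq.length then
    if seq[j] = "TAA" ∨ seq[j] = "TAG" ∨ seq[j] = "TGA" then some j
    else pvFindStop seq (j + 1)
  else none
termination_by seq.length - j

-- needed by loopA's termination: the break index is ≥ the scan start
theorem pvFindStop_ge (seq : List String) (k j : Nat) (h : pvFindStop seq k = some j) : k ≤ j := by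
  fun_induction pvFindStop seq k with
  | case1 k hk hs => simp_all
  | case2 k hk hs ih => have := ih h; omega
  | case3 k hk => simp_all

-- outer 'while i < len(seq)' loop; codon_list is acc; ''.join(str(e) for e in seq[i:j+1])
-- (str(e) on a str is the identity) is Str.join "" of the slice; 'i = j' then 'i += 1' resumes at j+1
def pvLoopA (seq : List String) (i : Nat) (acc : List String) : List String :=
  if h : i < seq.length then
    if seq[i] = "ATG" then
      match hfs : pvFindStop seq i with
      | some j =>
          pvLoopA seq (j + 1) (acc ++ [PySem.Str.join "" (PySem.List.slice seq (some (i : Int)) (some ((j : Int) + 1)))])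
      | none => pvLoopA seq (i + 1) acc
    else pvLoopA seq (i + 1) acc
  else acc
termination_by seq.length - i
decreasing_by
  · have := pvFindStop_ge seq i _ hfs; omega
  · omega
  · omega

def findCodonSeq (seq : List String) : List String :=
  pvLoopA seq 0 []

-- ===== PORT B =====
-- the loop body of Source B: state = (codon_list, buf)
def pvStepB (st : List String × Option String) (codon : String) : List String × Option String :=
  match st with
  | (res, none) => if codon = "ATG" then (res, some codon) else (res, none)
  | (res, some b) =>
      let b' := b ++ codon
      if codon = "TAA" ∨ codon = "TAG" ∨ codon = "TGA" then (res ++ [b'], none) else (res, some b')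

def findCodonSeq_alt (seq : List String) : List String :=
  (seq.foldl pvStepB ([], none)).1

-- ===== PRECONDITION & SPEC =====
def Spec_findCodonSeq (seq : List String) (out : List String) : Prop := out = findCodonSeq_alt seq
instance (seq : List String) (out : List String) : Decidable (Spec_findCodonSeq seq out) := by unfold Spec_findCodonSeq; infer_instance

-- ===== CLAIM (what is proved, stated in full; the proofs are below) =====
def Claim_equal_findCodonSeq : Prop := ∀ (seq : List String), Dom_findCodonSeq seq → Spec_findCodonSeq seq (findCodonSeq seq)

-- ===== LEMMAS AND PROOFS =====

-- B's pass, written as structural recursion carrying only the open buffer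
def pvGoB : List String → Option String → List String
  | [], _ => []
  | c :: rest, none => if c = "ATG" then pvGoB rest (some c) else pvGoB rest none
  | c :: rest, some b =>
      if c = "TAA" ∨ c = "TAG" ∨ c = "TGA" then (b ++ c) :: pvGoB rest none
      else pvGoB rest (some (b ++ c))

theorem pvFoldB_eq_goB (l : List String) (res : List String) (b : Option String) :
    (l.foldl pvStepB (res, b)).1 = res ++ pvGoB l b := by
  induction l generalizing res b with
  | nil => cases b <;> simp [pvGoB]
  | cons c rest ih =>
      cases b with
      | none =>
          by_cases hc : c = "ATG" <;> simp [pvStepB, pvGoB, hc, ih]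
      | some s =>
          by_cases hs : c = "TAA" ∨ c = "TAG" ∨ c = "TGA" <;>
            simp [pvStepB, pvGoB, hs, ih]

theorem pvGoB_no_stop (l : List String) (b : Option String)
    (h : ∀ c ∈ l, ¬(c = "TAA" ∨ c = "TAG" ∨ c = "TGA")) : pvGoB l b = [] := by
  induction l generalizing b with
  | nil => cases b <;> rfl
  | cons c rest ih =>
      have hc := h c (by simp)
      have hrest : ∀ c ∈ rest, ¬(c = "TAA" ∨ c = "TAG" ∨ c = "TGA") :=
        fun x hx => h x (by simp [hx])
      cases b with
      | none => by_cases hA : c = "ATG" <;> simp [pvGoB, hA, ih _ hrest]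
      | some s => simp [pvGoB, hc, ih _ hrest]

-- ''.join over a cons peels off the head string
theorem pvJoin_empty_cons (s : String) (parts : List String) :
    PySem.Str.join "" (s :: parts) = s ++ PySem.Str.join "" parts := by
  apply String.toList_inj.mp
  cases parts with
  | nil =>
      simp [PySem.Str.toList_join, PySem.Chars.join_singleton, PySem.Chars.join_nil,
        String.toList_append]
  | cons t rest =>
      simp [PySem.Str.toList_join, PySem.Chars.join_cons_cons, String.toList_append]

-- the string A appends for the frame seq[k:l]
def pvJoinRange (seq : List String) (k l : Nat) : String :=
  PySem.Str.join "" (PySem.List.slice seq (some (k : Int)) (some (l : Int)))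

theorem pvJoinRange_cons (seq : List String) (k l : Nat) (hk : k < seq.length) (hkl : k < l) :
    pvJoinRange seq k l = seq[k] ++ pvJoinRange seq (k + 1) l := by
  unfold pvJoinRange
  rw [PySem.List.slice_natCast, PySem.List.slice_natCast,
    List.drop_eq_getElem_cons hk]
  have : l - k = (l - (k + 1)) + 1 := by omega
  rw [this, List.take_succ_cons, pvJoin_empty_cons]

theorem pvJoinRange_single (seq : List String) (k : Nat) (hk : k < seq.length) :
    pvJoinRange seq k (k + 1) = seq[k] := by
  unfold pvJoinRange
  rw [PySem.List.slice_natCast]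
  have h1 : k + 1 - k = 1 := by omega
  rw [h1, List.drop_eq_getElem_cons hk, List.take_succ_cons, List.take_zero]
  apply String.toList_inj.mp
  rw [PySem.Str.toList_join]
  simp [PySem.Chars.join_singleton]

theorem pvFindStop_spec (seq : List String) (k j : Nat) (h : pvFindStop seq k = some j) :
    ∃ (hj : j < seq.length), (seq[j] = "TAA" ∨ seq[j] = "TAG" ∨ seq[j] = "TGA") ∧
      ∀ m (hm : m < seq.length), k ≤ m → m < j → ¬(seq[m] = "TAA" ∨ seq[m] = "TAG" ∨ seq[m] = "TGA") := by
  fun_induction pvFindStop seq k with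
  | case1 k hk hs =>
      have hjk : j = k := by simp_all
      subst hjk
      exact ⟨hk, hs, fun m hm h1 h2 => by omega⟩
  | case2 k hk hs ih =>
      obtain ⟨hj, hstop, hmid⟩ := ih h
      refine ⟨hj, hstop, fun m hm h1 h2 => ?_⟩
      rcases Nat.eq_or_lt_of_le h1 with rfl | hlt
      · exact hs
      · exact hmid m hm hlt h2
  | case3 k hk => simp_all

theorem pvFindStop_none (seq : List String) (k : Nat) (h : pvFindStop seq k = none) :
    ∀ m (hm : m < seq.length), k ≤ m → ¬(seq[m] = "TAA" ∨ seq[m] = "TAG" ∨ seq[m] = "TGA") := by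
  fun_induction pvFindStop seq k with
  | case1 k hk hs => simp_all
  | case2 k hk hs ih =>
      intro m hm hkm
      rcases Nat.eq_or_lt_of_le hkm with rfl | hlt
      · exact hs
      · exact ih h m hm hlt
  | case3 k hk =>
      intro m hm hkm
      omega

-- the scan from a started state up to the first stop at j (d = j - k)
theorem pvGoB_scan (seq : List String) (j : Nat) (hj : j < seq.length)
    (hstop : seq[j] = "TAA" ∨ seq[j] = "TAG" ∨ seq[j] = "TGA") :
    ∀ d k (b : String), k + d = j →
    (∀ m (hm : m < seq.length), k ≤ m → m < j → ¬(seq[m] = "TAA" ∨ seq[m] = "TAG" ∨ seq[m] = "TGA")) →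
    pvGoB (seq.drop k) (some b) = (b ++ pvJoinRange seq k (j + 1)) :: pvGoB (seq.drop (j + 1)) none := by
  intro d
  induction d with
  | zero =>
      intro k b hkd hmid
      have hk : k = j := by omega
      subst hk
      rw [List.drop_eq_getElem_cons hj]
      simp only [pvGoB, if_pos hstop]
      rw [pvJoinRange_single seq k hj]
  | succ d ih =>
      intro k b hkd hmid
      have hklt : k < j := by omega
      have hklen : k < seq.length := by omega
      have hns := hmid k hklen le_rfl hklt
      rw [List.drop_eq_getElem_cons hklen]
      simp only [pvGoB, if_neg hns]
      rw [ih (k + 1) (b ++ seq[k]) (by omega)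
        (fun m hm h1 h2 => hmid m hm (by omega) h2)]
      rw [pvJoinRange_cons seq k (j + 1) hklen (by omega)]
      rw [String.append_assoc]

theorem pvLoopA_eq_goB (seq : List String) :
    ∀ n k acc, seq.length - k ≤ n → pvLoopA seq k acc = acc ++ pvGoB (seq.drop k) none := by
  intro n
  induction n with
  | zero =>
      intro k acc hle
      have hk : ¬ k < seq.length := by omega
      rw [pvLoopA]
      simp [hk, List.drop_eq_nil_of_le (by omega : seq.length ≤ k), pvGoB]
  | succ n ih =>
      intro k acc hle
      by_cases hk : k < seq.length
      · by_cases hA : seq[k] = "ATG"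
        · cases hfs : pvFindStop seq k with
          | none =>
              have hnostop := pvFindStop_none seq k hfs
              have hall : ∀ l, k ≤ l → ∀ c ∈ seq.drop l, ¬(c = "TAA" ∨ c = "TAG" ∨ c = "TGA") := by
                intro l hl c hc
                obtain ⟨i, hi, rfl⟩ := List.mem_iff_getElem.mp hc
                rw [List.getElem_drop]
                exact hnostop (l + i) (by simp at hi; omega) (by omega)
              rw [pvLoopA]
              simp only [dif_pos hk, if_pos hA]
              split
              · next j' hfs' => rw [hfs] at hfs'; exact absurd hfs' (by simp)
              · next =>
                  rw [ih (k + 1) acc (by omega)]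
                  rw [pvGoB_no_stop _ _ (hall (k + 1) (by omega)),
                    pvGoB_no_stop _ _ (hall k le_rfl)]
          | some j =>
              obtain ⟨hj, hstop, hmid⟩ := pvFindStop_spec seq k j hfs
              have hkj : k < j := by
                rcases Nat.lt_or_ge k j with h | h
                · exact h
                · exfalso
                  have hjk : j = k := by
                    have := pvFindStop_ge seq k j hfs; omega
                  subst hjk
                  rw [hA] at hstop
                  revert hstop; decide
              rw [pvLoopA]
              simp only [dif_pos hk, if_pos hA]
              split
              · next j' hfs' =>
                  rw [hfs] at hfs'
                  injection hfs' with hj'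
                  subst hj'
                  rw [ih (j + 1) _ (by omega)]
                  rw [List.drop_eq_getElem_cons hk]
                  simp only [pvGoB, if_pos hA]
                  rw [pvGoB_scan seq j hj hstop (j - (k + 1)) (k + 1) (seq[k]) (by omega)
                    (fun m hm h1 h2 => hmid m hm (by omega) h2)]
                  rw [← pvJoinRange_cons seq k (j + 1) hk (by omega)]
                  have hcast : (some ((j : Int) + 1)) = (some (((j + 1 : Nat)) : Int)) := by
                    push_cast; rfl
                  unfold pvJoinRange
                  rw [hcast]
                  simp
              · next hfs' => rw [hfs] at hfs'; exact absurd hfs' (by simp)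
        · rw [pvLoopA]
          simp only [dif_pos hk, if_neg hA]
          rw [ih (k + 1) acc (by omega)]
          rw [List.drop_eq_getElem_cons hk]
          simp only [pvGoB, if_neg hA]
      · rw [pvLoopA]
        simp [hk, List.drop_eq_nil_of_le (by omega : seq.length ≤ k), pvGoB]

-- ===== VERDICT (by name: the statement is the Claim_ definition above) =====
theorem findCodonSeq_spec : Claim_equal_findCodonSeq := by
  intro seq _
  unfold Spec_findCodonSeq findCodonSeq findCodonSeq_alt
  rw [pvLoopA_eq_goB seq seq.length 0 [] (by omega), pvFoldB_eq_goB]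
  simp
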